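-- pv_equiv track=rewrite | github.com/yashbalan/Final_Assignment | Q3.py | firstLetters
-- ===== SOURCE A (Python) =====
-- def firstLetters(s):
--     result = []
--     in_word = False
--     for char in s:
--         if char != ' ' and not in_word:
--             result.append(char)
--             in_word = True
--         elif char == ' ':
--             in_word = False
--     return ''.join(result)
-- ===== SOURCE B (Python) =====
-- def firstLetters(s):
--     return ''.join(w[0] for w in s.split(' ') if w)
-- ===== Notes on version B (the rewrite author's own statement) =====
-- stated objective: idiomatic
-- what changed: Replaces A's in_word state-machine character loop with a split-then-index decomposition: split on the single space character, take the first character of each non-empty token, and join them.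
import Mathlib
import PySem

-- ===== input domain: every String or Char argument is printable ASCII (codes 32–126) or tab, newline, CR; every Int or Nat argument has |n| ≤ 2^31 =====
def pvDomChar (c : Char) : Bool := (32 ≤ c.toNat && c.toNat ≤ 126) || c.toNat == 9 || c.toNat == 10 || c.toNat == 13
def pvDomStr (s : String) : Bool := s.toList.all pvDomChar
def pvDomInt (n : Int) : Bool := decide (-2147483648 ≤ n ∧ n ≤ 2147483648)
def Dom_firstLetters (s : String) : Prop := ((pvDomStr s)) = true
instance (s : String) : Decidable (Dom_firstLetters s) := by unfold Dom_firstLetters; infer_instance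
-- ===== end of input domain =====

-- B replaces A's in_word state-machine pass with the idiomatic split-on-space / take-heads decomposition (C-level str.split instead of a Python char loop).


-- ===== PORT A =====
-- one loop step: if char != ' ' and not in_word: append, in_word = True; elif char == ' ': in_word = False
def pvStepA (st : List Char × Bool) (c : Char) : List Char × Bool :=
  if c ≠ ' ' ∧ st.2 = false then (st.1 ++ [c], true)
  else if c = ' ' then (st.1, false)
  else st

-- ''.join(result) on a list of 1-char strings is exactly String.ofList of the chars
def firstLetters (s : String) : String :=
  String.ofList (s.toList.foldl pvStepA ([], false)).1

-- ===== PORT B =====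
-- ''.join(w[0] for w in s.split(' ') if w): first char of each non-empty token = filterMap head?
def firstLetters_alt (s : String) : String :=
  String.ofList ((PySem.Chars.splitOn s.toList [' ']).filterMap List.head?)

-- ===== PRECONDITION & SPEC =====
def Spec_firstLetters (s : String) (out : String) : Prop := out = firstLetters_alt s
instance (s : String) (out : String) : Decidable (Spec_firstLetters s out) := by unfold Spec_firstLetters; infer_instance

-- ===== CLAIM (what is proved, stated in full; the proofs are below) =====
def Claim_equal_firstLetters : Prop := ∀ (s : String), Dom_firstLetters s → Spec_firstLetters s (firstLetters s)

-- ===== LEMMAS AND PROOFS =====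

-- reference single-space splitter (proof-side only)
def pvSplitSp (cur : List Char) : List Char → List (List Char)
  | [] => [cur.reverse]
  | c :: r => if c = ' ' then cur.reverse :: pvSplitSp [] r else pvSplitSp (c :: cur) r

lemma splitOn_go_eq : ∀ (fuel : Nat) (l cur : List Char) (acc : List (List Char)),
    l.length < fuel →
    PySem.Chars.splitOn.go [' '] fuel l cur acc = acc.reverse ++ pvSplitSp cur l := by
  intro fuel
  induction fuel with
  | zero => intro l cur acc h; omega
  | succ n ih =>
    intro l cur acc h
    cases l with
    | nil => simp [PySem.Chars.splitOn.go, pvSplitSp]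
    | cons c r =>
      by_cases hc : c = ' '
      · subst hc
        have : [' '].isPrefixOf (' ' :: r) = true := by simp [List.isPrefixOf]
        simp only [PySem.Chars.splitOn.go, this, if_pos, List.length_singleton, List.drop_succ_cons, List.drop_zero]
        rw [ih r [] ((cur.reverse) :: acc) (by simpa using Nat.lt_of_succ_lt_succ h)]
        simp [pvSplitSp]
      · have : [' '].isPrefixOf (c :: r) = false := by
          simp [List.isPrefixOf, Ne.symm hc]
        simp only [PySem.Chars.splitOn.go, this]
        rw [if_neg (by simp)]
        rw [ih r (c :: cur) acc (by simpa using Nat.lt_of_succ_lt_succ h)]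
        simp [pvSplitSp, hc]

lemma splitOn_eq_splitSp (l : List Char) :
    PySem.Chars.splitOn l [' '] = pvSplitSp [] l := by
  unfold PySem.Chars.splitOn
  rw [splitOn_go_eq (l.length + 1) l [] [] (by omega)]
  simp

-- the tail of pvSplitSp does not depend on the current-token accumulator
lemma splitSp_tail_indep : ∀ (l cur cur' : List Char),
    (pvSplitSp cur l).tail = (pvSplitSp cur' l).tail := by
  intro l
  induction l with
  | nil => intro cur cur'; simp [pvSplitSp]
  | cons c r ih =>
    intro cur cur'
    by_cases hc : c = ' '
    · simp [pvSplitSp, hc]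
    · simp [pvSplitSp, hc]; exact ih _ _

-- the first token of pvSplitSp cur l extends cur.reverse
lemma splitSp_head : ∀ (l cur : List Char), ∃ t rest,
    pvSplitSp cur l = (cur.reverse ++ t) :: rest := by
  intro l
  induction l with
  | nil => intro cur; exact ⟨[], [], by simp [pvSplitSp]⟩
  | cons c r ih =>
    intro cur
    by_cases hc : c = ' '
    · exact ⟨[], pvSplitSp [] r, by simp [pvSplitSp, hc]⟩
    · obtain ⟨t, rest, h⟩ := ih (c :: cur)
      exact ⟨c :: t, rest, by simp [pvSplitSp, hc, h]⟩

-- joint invariant for A's loop, in both in_word states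
lemma foldA_spec : ∀ (l : List Char),
    (∀ res : List Char, (l.foldl pvStepA (res, false)).1
        = res ++ (pvSplitSp [] l).filterMap List.head?) ∧
    (∀ res : List Char, (l.foldl pvStepA (res, true)).1
        = res ++ ((pvSplitSp [] l).tail.filterMap List.head?)) := by
  intro l
  induction l with
  | nil => constructor <;> intro res <;> simp [pvSplitSp]
  | cons c r ih =>
    obtain ⟨ihF, ihT⟩ := ih
    constructor
    · intro res
      by_cases hc : c = ' '
      · have : pvStepA (res, false) c = (res, false) := by simp [pvStepA, hc]
        simp only [List.foldl_cons, this, ihF]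
        simp [pvSplitSp, hc]
      · have : pvStepA (res, false) c = (res ++ [c], true) := by simp [pvStepA, hc]
        simp only [List.foldl_cons, this, ihT]
        obtain ⟨t, rest, hsp⟩ := splitSp_head r [c]
        have htail : (pvSplitSp [c] r).tail = (pvSplitSp [] r).tail :=
          splitSp_tail_indep r [c] []
        simp [pvSplitSp, hc, hsp, ← htail]
    · intro res
      by_cases hc : c = ' '
      · have : pvStepA (res, true) c = (res, false) := by simp [pvStepA, hc]
        simp only [List.foldl_cons, this, ihF]
        simp [pvSplitSp, hc]
      · have : pvStepA (res, true) c = (res, true) := by simp [pvStepA, hc]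
        simp only [List.foldl_cons, this, ihT]
        have htail : (pvSplitSp [c] r).tail = (pvSplitSp [] r).tail :=
          splitSp_tail_indep r [c] []
        simp [pvSplitSp, hc, htail]

-- ===== VERDICT (by name: the statement is the Claim_ definition above) =====
theorem firstLetters_spec : Claim_equal_firstLetters := by
  intro s _
  unfold Spec_firstLetters firstLetters firstLetters_alt
  rw [(foldA_spec s.toList).1 [], splitOn_eq_splitSp]
  simp
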